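-- pv_equiv track=rewrite | github.com/pai10464/python | moredc/moredc_34.py | pattern3
-- ===== SOURCE A (Python) =====
-- def pattern3(N):
--     ans = []
--     i = 1
--     for e in range(N):
--         sub = []
--         for k in range(e):
--             sub.append(0)
--         for j in range(N - e):
--             sub.append(i)
--             i += 1
--         ans.append(sub)
--     return ans
-- ===== SOURCE B (Python) =====
-- def pattern3(N):
--     rows = []
--     for e in range(N):
--         start = 1 + e * N - e * (e - 1) // 2
--         rows.append([0] * e + list(range(start, start + N - e)))
--     return rows
-- ===== Notes on version B (the rewrite author's own statement) =====
-- stated objective: alternative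
-- what changed: Each row is computed independently from the closed-form triangular offset start = 1 + e*N - e*(e-1)//2 and built as [0]*e + range(start, start+N-e), eliminating A's shared running counter and its two inner append loops.
import Mathlib
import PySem

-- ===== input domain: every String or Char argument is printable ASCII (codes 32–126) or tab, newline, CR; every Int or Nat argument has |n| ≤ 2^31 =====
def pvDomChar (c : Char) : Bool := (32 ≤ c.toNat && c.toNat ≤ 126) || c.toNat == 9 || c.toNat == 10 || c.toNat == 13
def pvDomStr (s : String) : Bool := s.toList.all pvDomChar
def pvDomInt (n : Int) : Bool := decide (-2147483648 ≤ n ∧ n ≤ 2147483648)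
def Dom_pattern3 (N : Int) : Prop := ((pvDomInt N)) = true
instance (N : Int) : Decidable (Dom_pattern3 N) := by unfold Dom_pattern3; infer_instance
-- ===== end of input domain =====

-- B computes each row independently from the closed-form triangular offset instead of A's running counter; same asymptotic cost.

-- ===== PORT A =====
-- Literal port of A: outer loop threads (ans, i); inner loops append 0s, then append-and-increment the counter.
def pattern3 (N : Int) : List (List Int) :=
  ((PySem.List.pyRange 0 N 1).foldl
    (fun (st : List (List Int) × Int) e =>
      let sub := (PySem.List.pyRange 0 e 1).foldl (fun s _ => s ++ [(0 : Int)]) []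
      let p := (PySem.List.pyRange 0 (N - e) 1).foldl
        (fun (p : List Int × Int) _ => (p.1 ++ [p.2], p.2 + 1)) (sub, st.2)
      (st.1 ++ [p.1], p.2))
    ([], 1)).1

-- ===== PORT B =====
-- Literal port of B: each row is [0]*e ++ list(range(start, start+N-e)) with start = 1 + e*N - e*(e-1)//2.
def pattern3_alt (N : Int) : List (List Int) :=
  (PySem.List.pyRange 0 N 1).map (fun e =>
    let start := 1 + e * N - PySem.Int.floordiv (e * (e - 1)) 2
    PySem.List.pyRepeat [(0 : Int)] e ++ PySem.List.pyRange start (start + N - e) 1)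

-- ===== PRECONDITION & SPEC =====
def Spec_pattern3 (N : Int) (out : List (List Int)) : Prop := out = pattern3_alt N
instance (N : Int) (out : List (List Int)) : Decidable (Spec_pattern3 N out) := by unfold Spec_pattern3; infer_instance

-- ===== CLAIM (what is proved, stated in full; the proofs are below) =====
def Claim_equal_pattern3 : Prop := ∀ (N : Int), Dom_pattern3 N → Spec_pattern3 N (pattern3 N)

-- ===== LEMMAS AND PROOFS =====

-- A's counter value at the start of row a (a rows of lengths N, N-1, … already emitted)
def pvStart (N : Int) (a : Nat) : Int := 1 + (a : Int) * N - ((a * (a - 1) / 2 : Nat) : Int)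

-- the row both programs produce for index a
def pvRow (N : Int) (a : Nat) : List Int :=
  List.replicate a 0 ++ PySem.List.pyRange (pvStart N a) (pvStart N a + N - (a : Int)) 1

theorem pv_tri_cast (a : Nat) :
    2 * ((a * (a - 1) / 2 : Nat) : Int) = (a : Int) * ((a : Int) - 1) := by
  cases a with
  | zero => simp
  | succ b =>
      have hd : 2 ∣ (b + 1) * b := by
        rcases Nat.even_or_odd b with hb | hb
        · exact Dvd.dvd.mul_left hb.two_dvd _
        · exact Dvd.dvd.mul_right (hb.add_one.two_dvd) _
      have h2 : (b + 1) * b / 2 * 2 = (b + 1) * b := Nat.div_mul_cancel hd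
      have h3 : (((b + 1) * b / 2 : Nat) : Int) * 2 = (((b + 1) * b : Nat) : Int) := by
        exact_mod_cast congrArg (Nat.cast : Nat → Int) h2
      simp only [Nat.add_sub_cancel]
      push_cast at h3 ⊢
      linear_combination h3

theorem pv_start_succ (N : Int) (a : Nat) (h : (a : Int) < N) :
    pvStart N a + ((N - (a : Int)).toNat : Int) = pvStart N (a + 1) := by
  have h1 := pv_tri_cast a
  have h2 := pv_tri_cast (a + 1)
  have h3 : ((N - (a : Int)).toNat : Int) = N - (a : Int) := by omega
  unfold pvStart
  rw [h3]
  generalize hT1 : ((a * (a - 1) / 2 : Nat) : Int) = T1 at h1 ⊢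
  generalize hT2 : (((a + 1) * (a + 1 - 1) / 2 : Nat) : Int) = T2 at h2 ⊢
  push_cast at h2 ⊢
  linarith [h1, h2]

theorem pv_zero_loop (l : List Int) (acc : List Int) :
    l.foldl (fun s _ => s ++ [(0 : Int)]) acc = acc ++ List.replicate l.length 0 := by
  induction l generalizing acc with
  | nil => simp
  | cons x xs ih => simp [List.foldl, ih, List.replicate_succ]

theorem pv_count_loop (l : List Int) (sub : List Int) (i : Int) :
    l.foldl (fun (p : List Int × Int) _ => (p.1 ++ [p.2], p.2 + 1)) (sub, i)
      = (sub ++ PySem.List.pyRange i (i + l.length) 1, i + l.length) := by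
  induction l generalizing sub i with
  | nil => simp [PySem.List.pyRange_one_eq_nil]
  | cons x xs ih =>
      simp only [List.foldl_cons, ih, List.length_cons]
      push_cast
      rw [PySem.List.pyRange_one_cons (show i < i + ((xs.length : Int) + 1) by omega)]
      simp only [Prod.mk.injEq]
      refine ⟨?_, by ring⟩
      have he : i + 1 + (xs.length : Int) = i + ((xs.length : Int) + 1) := by ring
      rw [he]
      simp

-- A's outer fold over rows a, a+1, …, a+m-1, started with the correct counter, emits exactly the pvRow's
theorem pv_outer (N : Int) (m a : Nat) (hm : (a : Int) + m ≤ N) (acc : List (List Int)) :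
    ((List.range' a m).map (fun n : Nat => (n : Int))).foldl
      (fun (st : List (List Int) × Int) e =>
        let sub := (PySem.List.pyRange 0 e 1).foldl (fun s _ => s ++ [(0 : Int)]) []
        let p := (PySem.List.pyRange 0 (N - e) 1).foldl
          (fun (p : List Int × Int) _ => (p.1 ++ [p.2], p.2 + 1)) (sub, st.2)
        (st.1 ++ [p.1], p.2))
      (acc, pvStart N a)
    = (acc ++ (List.range' a m).map (pvRow N), pvStart N (a + m)) := by
  induction m generalizing a acc with
  | zero => simp
  | succ k ih =>
      have ha : (a : Int) < N := by push_cast at hm; omega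
      rw [List.range'_succ, List.map_cons, List.foldl_cons, List.map_cons]
      show ((List.range' (a+1) k).map (fun n : Nat => (n : Int))).foldl _
        (acc ++ [(((PySem.List.pyRange 0 (N - (a:Int)) 1).foldl
          (fun (p : List Int × Int) _ => (p.1 ++ [p.2], p.2 + 1))
          ((PySem.List.pyRange 0 (a:Int) 1).foldl (fun s _ => s ++ [(0 : Int)]) [], pvStart N a)).1)],
         ((PySem.List.pyRange 0 (N - (a:Int)) 1).foldl
          (fun (p : List Int × Int) _ => (p.1 ++ [p.2], p.2 + 1))
          ((PySem.List.pyRange 0 (a:Int) 1).foldl (fun s _ => s ++ [(0 : Int)]) [], pvStart N a)).2) = _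
      rw [pv_zero_loop, pv_count_loop]
      have hlen0 : (PySem.List.pyRange 0 (a : Int) 1).length = a := by
        rw [PySem.List.length_pyRange_one]; omega
      have hlen1 : ((PySem.List.pyRange 0 (N - (a : Int)) 1).length : Int)
          = ((N - (a : Int)).toNat : Int) := by
        rw [PySem.List.length_pyRange_one]; simp
      simp only [hlen0, hlen1, List.nil_append]
      rw [pv_start_succ N a ha]
      rw [ih (a + 1) (by push_cast at hm ⊢; omega)]
      have hrow : List.replicate a (0 : Int) ++
          PySem.List.pyRange (pvStart N a) (pvStart N (a + 1)) 1
          = pvRow N a := by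
        have h4 : pvStart N (a + 1) = pvStart N a + N - (a : Int) := by
          rw [← pv_start_succ N a ha]; omega
        unfold pvRow
        rw [h4]
      rw [hrow]
      have hk : a + 1 + k = a + (k + 1) := by omega
      rw [hk]
      simp

-- B's row expression at e = ↑a is exactly pvRow N a
theorem pv_alt_row (N : Int) (a : Nat) :
    (PySem.List.pyRepeat [(0 : Int)] (a : Int) ++
      PySem.List.pyRange (1 + (a : Int) * N - PySem.Int.floordiv ((a : Int) * ((a : Int) - 1)) 2)
        ((1 + (a : Int) * N - PySem.Int.floordiv ((a : Int) * ((a : Int) - 1)) 2) + N - (a : Int)) 1)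
    = pvRow N a := by
  have he : (a : Int) * ((a : Int) - 1) = ((a * (a - 1) : Nat) : Int) := by
    cases a with
    | zero => simp
    | succ b => push_cast [Nat.add_sub_cancel]; ring
  have hfd : PySem.Int.floordiv ((a : Int) * ((a : Int) - 1)) 2
      = ((a * (a - 1) / 2 : Nat) : Int) := by
    rw [he]
    exact_mod_cast PySem.Int.floordiv_natCast (a * (a - 1)) 2
  rw [hfd]
  unfold pvRow pvStart
  congr 1
  rw [PySem.List.pyRepeat_singleton]
  simp

theorem pattern3_eq (N : Int) : pattern3 N = pattern3_alt N := by
  unfold pattern3 pattern3_alt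
  by_cases hN : N ≤ 0
  · rw [PySem.List.pyRange_one_eq_nil hN]; simp
  · have hr : PySem.List.pyRange 0 N 1 = (List.range' 0 N.toNat).map (fun n : Nat => (n : Int)) := by
      rw [PySem.List.pyRange_one, List.range_eq_range']
      simp
    rw [hr]
    have h0 : pvStart N 0 = 1 := by unfold pvStart; simp
    have hout := pv_outer N N.toNat 0 (by omega) []
    rw [h0] at hout
    rw [hout]
    simp only [List.nil_append, List.map_map]
    apply List.map_congr_left
    intro n _
    exact (pv_alt_row N n).symm

-- ===== VERDICT (by name: the statement is the Claim_ definition above) =====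
theorem pattern3_spec : Claim_equal_pattern3 := by
  intro N _
  unfold Spec_pattern3
  exact pattern3_eq N
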